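-- pv_equiv track=rewrite | github.com/Buscedv/Ask | ask/transpiler/utilities/parser_utils.py | get_current_tab_level
-- ===== SOURCE A (Python) =====
-- def get_current_tab_level(parsed):
-- 	parsed = parsed[::-1]
--
-- 	indents = ''
--
-- 	for char in parsed:
-- 		if char == '\t':
-- 			indents += char
-- 		elif char == '\n':
-- 			break
--
-- 	return indents
-- ===== SOURCE B (Python) =====
-- def get_current_tab_level(parsed):
-- 	tabs = 0
-- 	for char in parsed:
-- 		if char == '\n':
-- 			tabs = 0
-- 		elif char == '\t':
-- 			tabs += 1
-- 	return '\t' * tabs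
-- ===== Notes on version B (the rewrite author's own statement) =====
-- stated objective: alternative
-- what changed: B replaces A's reverse-then-collect-until-newline string accumulation by a single forward pass keeping only a tab counter that resets at each newline, rebuilding the result by tab-string repetition at the end.
import Mathlib
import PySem

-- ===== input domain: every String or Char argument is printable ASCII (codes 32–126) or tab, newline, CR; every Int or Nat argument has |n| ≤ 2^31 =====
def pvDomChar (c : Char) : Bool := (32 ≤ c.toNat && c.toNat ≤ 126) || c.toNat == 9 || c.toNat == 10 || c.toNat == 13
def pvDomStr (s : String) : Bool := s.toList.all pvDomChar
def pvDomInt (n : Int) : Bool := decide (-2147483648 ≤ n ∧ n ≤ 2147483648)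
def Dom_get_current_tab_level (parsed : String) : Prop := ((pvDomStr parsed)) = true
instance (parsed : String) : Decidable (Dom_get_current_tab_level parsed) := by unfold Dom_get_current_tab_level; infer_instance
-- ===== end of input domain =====

-- B changes the decomposition: one forward pass with a counter reset at newlines instead of A's
-- reverse-then-collect-until-newline string accumulation; same cost, no reversal.

-- ===== PORT A =====
-- the for-loop with break: walks the reversed chars, appending tabs, stopping at the first newline
def pvGoA : List Char → List Char → List Char
  | [], acc => acc
  | c :: rest, acc =>
    if c = '\t' then pvGoA rest (acc ++ [c])
    else if c = '\n' then acc
    else pvGoA rest acc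

def get_current_tab_level (parsed : String) : String :=
  -- parsed[::-1] is exactly List.reverse on the code points
  String.ofList (pvGoA parsed.toList.reverse [])

-- ===== PORT B =====
def get_current_tab_level_alt (parsed : String) : String :=
  let tabs := parsed.toList.foldl
    (fun t c => if c = '\n' then 0 else if c = '\t' then t + 1 else t) 0
  -- '\t' * tabs
  String.ofList (List.replicate tabs '\t')

-- ===== PRECONDITION & SPEC =====
def Spec_get_current_tab_level (parsed : String) (out : String) : Prop := out = get_current_tab_level_alt parsed
instance (parsed : String) (out : String) : Decidable (Spec_get_current_tab_level parsed out) := by unfold Spec_get_current_tab_level; infer_instance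

-- ===== CLAIM (what is proved, stated in full; the proofs are below) =====
def Claim_equal_get_current_tab_level : Prop := ∀ (parsed : String), Dom_get_current_tab_level parsed → Spec_get_current_tab_level parsed (get_current_tab_level parsed)

-- ===== LEMMAS AND PROOFS =====

theorem pvGoA_eq (l : List Char) (acc : List Char) :
    pvGoA l acc = acc ++ List.replicate ((l.takeWhile (fun c => c != '\n')).count '\t') '\t' := by
  induction l generalizing acc with
  | nil => simp [pvGoA]
  | cons c rest ih =>
    by_cases ht : c = '\t'
    · subst ht
      simp [pvGoA, ih, List.replicate_succ]
    · by_cases hn : c = '\n'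
      · subst hn; simp [pvGoA, ht]
      · simp [pvGoA, ht, hn, ih]

theorem pv_tw_append_stop {α : Type} (p : α → Bool) (l₁ l₂ : List α)
    (h : ∃ x ∈ l₁, p x = false) : (l₁ ++ l₂).takeWhile p = l₁.takeWhile p := by
  induction l₁ with
  | nil => rcases h with ⟨x, hx, _⟩; cases hx
  | cons a l ih =>
    by_cases hpa : p a = true
    · rcases h with ⟨x, hx, hpx⟩
      rcases List.mem_cons.mp hx with rfl | hx'
      · rw [hpa] at hpx; cases hpx
      · simp [hpa, ih ⟨x, hx', hpx⟩]
    · simp [hpa]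

theorem pv_tw_append_all {α : Type} (p : α → Bool) (l₁ l₂ : List α)
    (h : ∀ x ∈ l₁, p x = true) : (l₁ ++ l₂).takeWhile p = l₁ ++ l₂.takeWhile p := by
  induction l₁ with
  | nil => simp
  | cons a l ih =>
    have hpa := h a (List.mem_cons_self ..)
    simp [hpa, ih (fun x hx => h x (List.mem_cons_of_mem a hx))]

theorem pvFoldB_eq (l : List Char) (t : Nat) :
    l.foldl (fun t c => if c = '\n' then 0 else if c = '\t' then t + 1 else t) t =
      if '\n' ∈ l then ((l.reverse.takeWhile (fun c => c != '\n')).count '\t')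
      else t + l.count '\t' := by
  induction l generalizing t with
  | nil => simp
  | cons c rest ih =>
    by_cases hn : c = '\n'
    · subst hn
      simp only [List.foldl_cons, ih, List.mem_cons, true_or, if_true,
        List.reverse_cons]
      by_cases hm : '\n' ∈ rest
      · rw [pv_tw_append_stop _ _ _ ⟨'\n', List.mem_reverse.mpr hm, rfl⟩]
        simp [hm]
      · rw [pv_tw_append_all]
        · simp [hm, List.count_reverse]
        · intro x hx
          simp only [bne_iff_ne, ne_eq]
          intro h; exact hm (h ▸ List.mem_reverse.mp hx)
    · have hmem : ('\n' ∈ c :: rest) ↔ ('\n' ∈ rest) := by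
        constructor
        · intro h; rcases List.mem_cons.mp h with h | h
          · exact absurd h.symm hn
          · exact h
        · exact List.mem_cons_of_mem c
      by_cases hm : '\n' ∈ rest
      · have hta : ((rest.reverse ++ [c]).takeWhile (fun c => c != '\n')).count '\t' =
            (rest.reverse.takeWhile (fun c => c != '\n')).count '\t' := by
          rw [pv_tw_append_stop _ _ _ ⟨'\n', List.mem_reverse.mpr hm, rfl⟩]
        by_cases ht : c = '\t'
        · subst ht; simp [List.foldl_cons, ih, hm, hmem, hta]
        · simp [List.foldl_cons, hn, ht, ih, hm, hmem, hta]
      · have hm' : ¬ '\n' ∈ (c :: rest) := by rw [hmem]; exact hm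
        by_cases ht : c = '\t'
        · subst ht
          simp [List.foldl_cons, ih, hm, hm']
          omega
        · simp [List.foldl_cons, hn, ht, ih, hm, hm']

-- ===== VERDICT (by name: the statement is the Claim_ definition above) =====
theorem get_current_tab_level_spec : Claim_equal_get_current_tab_level := by
  intro parsed _
  unfold Spec_get_current_tab_level get_current_tab_level get_current_tab_level_alt
  rw [pvGoA_eq, pvFoldB_eq]
  by_cases hm : '\n' ∈ parsed.toList
  · simp [hm]
  · have hall : parsed.toList.reverse.takeWhile (fun c => c != '\n') = parsed.toList.reverse := by
      apply List.takeWhile_eq_self_iff.mpr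
      intro x hx
      simp only [bne_iff_ne, ne_eq]
      intro h; exact hm (List.mem_reverse.mp (h ▸ hx))
    simp [hm, hall, List.count_reverse]
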